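-- pv_equiv track=rewrite | github.com/pc5401/my_BOJ | 백준/Silver/26265. 멘토와 멘티/멘토와 멘티.py | solve
-- ===== SOURCE A (Python) =====
-- def solve(N: int, lst: list[list[str]]) -> list[list[str]]:
--     result = []
--     data = dict()
--     for mentor, mentee in lst:
--         if not data.get(mentor):
--             data[mentor] = [mentee]
--         else:
--             data[mentor].append(mentee)
--
--     mentor_lst = sorted(data.keys())
--
--     for mentor in mentor_lst:
--         mentee_lst = sorted(data[mentor], reverse=True)
--         for mentee in mentee_lst:
--             result.append([mentor, mentee])
--
--     return result
-- ===== SOURCE B (Python) =====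
-- def solve(N: int, lst: list[list[str]]) -> list[list[str]]:
--     # No dict: sorted set of mentors, then one rescan of lst per mentor.
--     result = []
--     for mentor in sorted({mentor for mentor, mentee in lst}):
--         for mentee in sorted((e for m, e in lst if m == mentor), reverse=True):
--             result.append([mentor, mentee])
--     return result
-- ===== Notes on version B (the rewrite author's own statement) =====
-- stated objective: alternative
-- what changed: replaces A's dict-based grouping (build dict of mentor->mentee list, sort keys, sort each bucket) with a sorted set of mentors and a per-mentor rescan of the flat input list; no dict is built
import Mathlib
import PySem

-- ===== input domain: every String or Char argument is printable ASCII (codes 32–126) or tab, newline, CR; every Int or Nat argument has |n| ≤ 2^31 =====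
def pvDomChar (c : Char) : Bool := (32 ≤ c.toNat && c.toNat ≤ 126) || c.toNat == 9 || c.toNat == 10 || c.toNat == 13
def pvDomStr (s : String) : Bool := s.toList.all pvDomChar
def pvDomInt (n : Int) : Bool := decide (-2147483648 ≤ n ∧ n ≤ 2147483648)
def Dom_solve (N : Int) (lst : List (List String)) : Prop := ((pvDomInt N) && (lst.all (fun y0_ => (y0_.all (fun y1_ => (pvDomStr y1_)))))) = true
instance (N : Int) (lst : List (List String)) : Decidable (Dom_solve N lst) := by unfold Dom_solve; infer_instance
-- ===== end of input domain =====

-- B replaces A's dict grouping by a sorted mentor set plus a per-mentor rescan; equal output, similar cost.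

-- ===== PORT A =====
-- one iteration of A's grouping loop: 'if not data.get(mentor): data[mentor]=[mentee] else: data[mentor].append(mentee)'
def solveStep (d : PySem.Dict String (List String)) (row : List String) : PySem.Dict String (List String) :=
  match row with
  | [mentor, mentee] =>
    match d.get? mentor with
    | some v => if v.isEmpty then d.insert mentor [mentee]
                else d.modify mentor [] (fun l => l ++ [mentee])
    | none => d.insert mentor [mentee]
  | _ => d    -- rows not of length 2 raise ValueError in Python; excluded by Pre_solve

def solve (N : Int) (lst : List (List String)) : List (List String) :=
  let data := lst.foldl solveStep PySem.Dict.empty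
  let mentorLst := PySem.List.sorted data.keys (fun x => x) false
  mentorLst.foldl (fun result mentor =>
    (PySem.List.sorted (data.getD mentor []) (fun x => x) true).foldl
      (fun result mentee => result ++ [[mentor, mentee]]) result) []

-- ===== PORT B =====
def solve_alt (N : Int) (lst : List (List String)) : List (List String) :=
  let mentors := PySem.List.sorted
    (lst.foldl (fun s row => match row with
      | [mentor, _] => PySem.Set.add s mentor
      | _ => s) (PySem.Set.empty : PySem.Set String)) (fun x => x) false
  mentors.foldl (fun result mentor =>
    (PySem.List.sorted
      (lst.foldl (fun acc row => match row with
        | [m, e] => if m = mentor then acc ++ [e] else acc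
        | _ => acc) ([] : List String)) (fun x => x) true).foldl
      (fun result mentee => result ++ [[mentor, mentee]]) result) []

-- ===== PRECONDITION & SPEC =====
-- Pre_ excludes rows whose length is not 2: Python's 'for mentor, mentee in lst' raises ValueError there.
def Pre_solve (N : Int) (lst : List (List String)) : Prop := ∀ r ∈ lst, r.length = 2
instance (N : Int) (lst : List (List String)) : Decidable (Pre_solve N lst) := by unfold Pre_solve; infer_instance
def pvWitness_solve : Int × List (List String) := (2, [["b", "x"], ["a", "y"], ["b", "z"]])

def Spec_solve (N : Int) (lst : List (List String)) (out : List (List String)) : Prop := out = solve_alt N lst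
instance (N : Int) (lst : List (List String)) (out : List (List String)) : Decidable (Spec_solve N lst out) := by unfold Spec_solve; infer_instance

-- ===== CLAIM (what is proved, stated in full; the proofs are below) =====
def Claim_equal_solve : Prop := ∀ (N : Int) (lst : List (List String)), Dom_solve N lst → Pre_solve N lst → Spec_solve N lst (solve N lst)

-- ===== LEMMAS AND PROOFS =====

-- mentor and mentee of a length-2 row
def pm (r : List String) : String := r.headD ""
def pe (r : List String) : String := (r.drop 1).headD ""

theorem row_eq_pair {r : List String} (h : r.length = 2) : r = [pm r, pe r] := by
  match r, h with
  | [a, b], _ => rfl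

theorem solveStep_eq (d : PySem.Dict String (List String)) (m e : String) :
    solveStep d [m, e] = (match d.get? m with
      | some v => if v.isEmpty then d.insert m [e] else d.modify m [] (fun l => l ++ [e])
      | none => d.insert m [e]) := rfl

-- one grouping step, seen through getD
theorem getD_solveStep (d : PySem.Dict String (List String)) (m e k : String) :
    (solveStep d [m, e]).getD k [] =
      if k = m then d.getD k [] ++ [e] else d.getD k [] := by
  rw [solveStep_eq]
  cases hg : d.get? m with
  | none =>
    show (d.insert m [e]).getD k [] = _
    rw [PySem.Dict.getD_insert]
    by_cases hk : k = m
    · subst hk; simp [PySem.Dict.getD_of_get?_eq_none d ([] : List String) hg]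
    · simp [hk]
  | some v =>
    by_cases hv : v.isEmpty
    · show (if v.isEmpty then d.insert m [e] else _).getD k [] = _
      rw [if_pos hv, PySem.Dict.getD_insert]
      by_cases hk : k = m
      · subst hk
        have hdv : d.getD k [] = v := PySem.Dict.getD_of_get?_eq_some d ([] : List String) hg
        simp [hdv, List.isEmpty_iff.mp hv]
      · simp [hk]
    · show (if v.isEmpty then _ else d.modify m [] (fun l => l ++ [e])).getD k [] = _
      rw [if_neg hv, PySem.Dict.getD_modify]
      by_cases hk : k = m
      · subst hk
        have hdv : d.getD k [] = v := PySem.Dict.getD_of_get?_eq_some d ([] : List String) hg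
        simp [hdv]
      · simp [hk]

-- the grouping fold, seen through getD: bucket k = mentees of rows with mentor k, in order
theorem getD_build (lst : List (List String)) (d : PySem.Dict String (List String))
    (h : ∀ r ∈ lst, r.length = 2) (k : String) :
    (lst.foldl solveStep d).getD k [] =
      d.getD k [] ++ ((lst.filter (fun r => decide (pm r = k))).map pe) := by
  induction lst generalizing d with
  | nil => simp
  | cons r rest ih =>
    have hr := row_eq_pair (h r (by simp))
    have hrest : ∀ r ∈ rest, r.length = 2 := fun r hm => h r (by simp [hm])
    rw [List.foldl_cons]
    conv_lhs => rw [hr]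
    rw [ih _ hrest, getD_solveStep]
    by_cases hk : pm r = k
    · rw [if_pos hk.symm, List.filter_cons_of_pos (by simp [hk])]
      simp
    · rw [if_neg (fun hh => hk hh.symm), List.filter_cons_of_neg (by simp [hk])]

-- membership in the keys of a grouping step
theorem mem_keys_solveStep (d : PySem.Dict String (List String)) (m e k : String) :
    k ∈ (solveStep d [m, e]).keys ↔ k = m ∨ k ∈ d.keys := by
  rw [solveStep_eq]
  cases hg : d.get? m with
  | none =>
    show k ∈ (d.insert m [e]).keys ↔ _
    simp [PySem.Dict.mem_keys_insert]
  | some v =>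
    by_cases hv : v.isEmpty
    · show k ∈ (if v.isEmpty then d.insert m [e] else _).keys ↔ _
      rw [if_pos hv]
      simp [PySem.Dict.mem_keys_insert]
    · show k ∈ (if v.isEmpty then _ else d.modify m [] (fun l => l ++ [e])).keys ↔ _
      rw [if_neg hv, PySem.Dict.keys_modify]
      exact PySem.Dict.mem_keys_insert _ _ _ _

theorem mem_keys_build (lst : List (List String)) (d : PySem.Dict String (List String))
    (h : ∀ r ∈ lst, r.length = 2) (k : String) :
    k ∈ (lst.foldl solveStep d).keys ↔ k ∈ d.keys ∨ ∃ r ∈ lst, pm r = k := by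
  induction lst generalizing d with
  | nil => simp
  | cons r rest ih =>
    have hr := row_eq_pair (h r (by simp))
    have hrest : ∀ r ∈ rest, r.length = 2 := fun r hm => h r (by simp [hm])
    rw [List.foldl_cons]
    conv_lhs => rw [hr]
    rw [ih _ hrest, mem_keys_solveStep]
    constructor
    · rintro (h1 | h2)
      · rcases h1 with h1 | h1
        · exact Or.inr ⟨r, by simp, h1.symm⟩
        · exact Or.inl h1
      · rcases h2 with ⟨r', hr', hpm⟩
        exact Or.inr ⟨r', by simp [hr'], hpm⟩
    · rintro (h1 | ⟨r', hr', hpm⟩)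
      · exact Or.inl (Or.inr h1)
      · rcases List.mem_cons.mp hr' with hh | hh
        · exact Or.inl (Or.inl (by rw [← hpm, hh]))
        · exact Or.inr ⟨r', hh, hpm⟩

theorem nodup_keys_solveStep (d : PySem.Dict String (List String)) (r : List String)
    (h : d.keys.Nodup) : (solveStep d r).keys.Nodup := by
  match r with
  | [] => exact h
  | [_] => exact h
  | (_ :: _ :: _ :: _) => exact h
  | [m, e] =>
    rw [solveStep_eq]
    cases d.get? m with
    | none => exact PySem.Dict.nodup_keys_insert _ _ _ h
    | some v =>
      by_cases hv : v.isEmpty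
      · show ((if v.isEmpty then d.insert m [e] else _).keys).Nodup
        rw [if_pos hv]; exact PySem.Dict.nodup_keys_insert _ _ _ h
      · show ((if v.isEmpty then _ else d.modify m [] (fun l => l ++ [e])).keys).Nodup
        rw [if_neg hv, PySem.Dict.keys_modify]; exact PySem.Dict.nodup_keys_insert _ _ _ h

theorem nodup_keys_build (lst : List (List String)) (d : PySem.Dict String (List String))
    (h : d.keys.Nodup) : (lst.foldl solveStep d).keys.Nodup := by
  induction lst generalizing d with
  | nil => exact h
  | cons r rest ih => exact ih _ (nodup_keys_solveStep d r h)

-- B's set fold is set(map(pm, lst))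
theorem set_fold_eq (lst : List (List String)) (h : ∀ r ∈ lst, r.length = 2) :
    lst.foldl (fun s row => match row with
      | [mentor, _] => PySem.Set.add s mentor
      | _ => s) (PySem.Set.empty : PySem.Set String)
      = PySem.Set.ofList (lst.map pm) := by
  rw [PySem.List.foldl_congr_mem (g := fun s r => PySem.Set.add s (pm r))]
  · rw [← PySem.Set.update_map_eq_foldl_add]
    rfl
  · intro acc r hr
    conv_lhs => rw [row_eq_pair (h r hr)]

-- B's inner fold is the mentee filter
theorem mentees_fold_eq (lst : List (List String)) (h : ∀ r ∈ lst, r.length = 2) (mentor : String) :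
    lst.foldl (fun acc row => match row with
      | [m, e] => if m = mentor then acc ++ [e] else acc
      | _ => acc) ([] : List String)
      = (lst.filter (fun r => decide (pm r = mentor))).map pe := by
  rw [PySem.List.foldl_congr_mem (g := fun acc r => if pm r = mentor then acc ++ [pe r] else acc)]
  · rw [PySem.List.foldl_append_ite]
    simp
  · intro acc r hr
    conv_lhs => rw [row_eq_pair (h r hr)]

-- the two sorted mentor lists coincide
theorem mentors_eq (lst : List (List String)) (h : ∀ r ∈ lst, r.length = 2) :
    PySem.List.sorted (lst.foldl solveStep PySem.Dict.empty).keys (fun x => x) false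
      = PySem.List.sorted (PySem.Set.ofList (lst.map pm)) (fun x => x) false := by
  apply PySem.List.sorted_eq_sorted_of_perm _ _ _ (fun a b hab => hab)
  rw [List.perm_ext_iff_of_nodup (nodup_keys_build lst _ (by simp [PySem.Dict.keys_empty])) (PySem.Set.nodup_ofList _)]
  intro k
  rw [mem_keys_build lst _ h k, PySem.Set.mem_ofList]
  simp [PySem.Dict.keys_empty, eq_comm]

-- ===== VERDICT (by name: the statement is the Claim_ definition above) =====
theorem solve_spec : Claim_equal_solve := by
  intro N lst _ hpre
  unfold Spec_solve solve solve_alt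
  rw [set_fold_eq lst hpre, ← mentors_eq lst hpre]
  apply PySem.List.foldl_congr_mem
  intro acc mentor _
  rw [mentees_fold_eq lst hpre mentor, getD_build lst PySem.Dict.empty hpre mentor]
  simp [PySem.Dict.getD_empty]
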